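-- pv_equiv track=rewrite | github.com/wawzysys/Algorithm | 2024bishi/京东8.31/1.py | solve
-- ===== SOURCE A (Python) =====
-- def solve(s):
--     s_list = list(s)
--     n = len(s_list)
--
--     i = n - 1
--     while i >= 0 and s_list[i] == 'z':
--         i -= 1
--
--     if i == -1:
--         return "-1"
--
--     s_list[i] = chr(ord(s_list[i]) + 1)
--     for j in range(i + 1, n):
--         s_list[j] = 'a'
--     return ''.join(s_list)
-- ===== SOURCE B (Python) =====
-- def _bump(t):
--     # returns None if t is all 'z' (including empty), else the incremented char list
--     if not t:
--         return None
--     if t[-1] == 'z':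
--         r = _bump(t[:-1])
--         return None if r is None else r + ['a']
--     return t[:-1] + [chr(ord(t[-1]) + 1)]
--
-- def solve(s):
--     r = _bump(list(s))
--     return "-1" if r is None else ''.join(r)
-- ===== Notes on version B (the rewrite author's own statement) =====
-- stated objective: alternative
-- what changed: Replaces the index-based backward scan plus in-place fill loop by a recursive decomposition: a helper recurses on s[:-1], returning None for an all-'z' (or empty) suffix chain and otherwise appending 'a' per consumed 'z' and bumping the first non-'z' character found, so no indices or mutation are used.
import Mathlib
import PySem

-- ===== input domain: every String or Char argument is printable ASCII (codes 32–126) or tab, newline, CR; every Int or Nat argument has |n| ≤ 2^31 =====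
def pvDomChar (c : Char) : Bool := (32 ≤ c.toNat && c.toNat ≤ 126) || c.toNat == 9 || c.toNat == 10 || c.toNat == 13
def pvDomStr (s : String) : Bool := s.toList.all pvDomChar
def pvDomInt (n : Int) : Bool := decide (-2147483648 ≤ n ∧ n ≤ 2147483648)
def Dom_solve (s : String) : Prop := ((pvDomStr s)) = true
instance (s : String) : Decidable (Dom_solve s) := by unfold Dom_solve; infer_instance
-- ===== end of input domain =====

-- B replaces A's index-based backward scan and in-place fill loop by a recursive
-- decomposition on s[:-1] with a None sentinel for the all-'z' case (alternative, same cost).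

-- ===== PORT A =====
-- the 'while i >= 0 and s_list[i] == 'z': i -= 1' loop
def solveScan (l : List Char) (i : Int) : Int :=
  if h : 0 ≤ i ∧ PySem.List.pyGet? l i = some 'z' then solveScan l (i - 1) else i
termination_by (i + 1).toNat
decreasing_by omega

def solve (s : String) : String :=
  let sList := s.toList
  let n := sList.length
  let i := solveScan sList ((n : Int) - 1)
  if i = -1 then "-1"
  else
    let c := PySem.List.pyGetD sList i 'a'          -- s_list[i] (in range here)
    let sList2 := PySem.List.pySetD sList i (Char.ofNat (c.toNat + 1))
    let sList3 := (PySem.List.pyRange (i + 1) (n : Int) 1).foldl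
      (fun acc j => PySem.List.pySetD acc j 'a') sList2
    String.ofList sList3

-- ===== PORT B =====
-- _bump(t): recurse on t[:-1]; None means 't is all z (or empty)'
def bumpAlt (t : List Char) : Option (List Char) :=
  if h : t = [] then none
  else if PySem.List.pyGetD t (-1) 'a' = 'z' then      -- t[-1] == 'z'
    match bumpAlt t.dropLast with                       -- _bump(t[:-1])
    | none => none
    | some r => some (r ++ ['a'])                       -- r + ['a']
  else some (t.dropLast ++ [Char.ofNat ((PySem.List.pyGetD t (-1) 'a').toNat + 1)])
termination_by t.length
decreasing_by
  have := List.length_pos_of_ne_nil h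
  simp [List.length_dropLast]; omega

def solve_alt (s : String) : String :=
  match bumpAlt s.toList with
  | none => "-1"
  | some r => String.ofList r

-- ===== PRECONDITION & SPEC =====
def Spec_solve (s : String) (out : String) : Prop := out = solve_alt s
instance (s : String) (out : String) : Decidable (Spec_solve s out) := by unfold Spec_solve; infer_instance

-- ===== CLAIM (what is proved, stated in full; the proofs are below) =====
def Claim_equal_solve : Prop := ∀ (s : String), Dom_solve s → Spec_solve s (solve s)

-- ===== LEMMAS AND PROOFS =====

-- proof-side characterisation: what bumpAlt computes, in rstrip form
def rstripZ (cs : List Char) : List Char := (cs.reverse.dropWhile (· == 'z')).reverse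

def bForm (l : List Char) : Option (List Char) :=
  if rstripZ l = [] then none
  else some ((rstripZ l).dropLast
    ++ [Char.ofNat ((PySem.List.pyGetD (rstripZ l) (-1) 'a').toNat + 1)]
    ++ List.replicate (l.length - (rstripZ l).length) 'a')

theorem dropWhile_eq_drop (p : Char → Bool) (l : List Char) :
    l.dropWhile p = l.drop (l.takeWhile p).length := by
  induction l with
  | nil => simp
  | cons a l ih => by_cases h : p a <;> simp [h, ih]

theorem rstripZ_eq_take (l : List Char) :
    rstripZ l = l.take (l.length - (l.reverse.takeWhile (· == 'z')).length) := by
  unfold rstripZ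
  rw [dropWhile_eq_drop, List.drop_reverse, List.reverse_reverse]

theorem rstripZ_length_le (l : List Char) : (rstripZ l).length ≤ l.length := by
  rw [rstripZ_eq_take]; simp

theorem rstripZ_snoc_z (x : List Char) : rstripZ (x ++ ['z']) = rstripZ x := by
  unfold rstripZ
  simp [List.dropWhile]

theorem rstripZ_snoc_ne (x : List Char) (c : Char) (h : c ≠ 'z') :
    rstripZ (x ++ [c]) = x ++ [c] := by
  unfold rstripZ
  have : (c == 'z') = false := beq_eq_false_iff_ne.mpr h
  simp [List.dropWhile, this]

theorem bumpAlt_eq_bForm (n : Nat) : ∀ l : List Char, l.length = n → bumpAlt l = bForm l := by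
  induction n using Nat.strong_induction_on with
  | _ n ih =>
    intro l hl
    by_cases hnil : l = []
    · subst hnil
      rw [bumpAlt]
      simp [bForm, rstripZ]
    · have hsnoc := (List.dropLast_append_getLast hnil).symm
      set L := l.getLast hnil with hL
      set x := l.dropLast with hx
      have hlenx : x.length + 1 = l.length := by
        rw [hsnoc]; simp
      have hget : PySem.List.pyGetD l (-1) 'a' = L := by
        rw [hsnoc]; exact PySem.List.pyGetD_neg_one_append_singleton _ _ _
      rw [bumpAlt, dif_neg hnil, hget]
      by_cases hz : L = 'z'
      · rw [if_pos hz]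
        have hrec : bumpAlt x = bForm x := ih x.length (by omega) x rfl
        have hstrip : rstripZ l = rstripZ x := by
          conv_lhs => rw [hsnoc, hz]
          exact rstripZ_snoc_z x
        rw [← hx, hrec]
        unfold bForm
        rw [hstrip]
        by_cases he : rstripZ x = []
        · simp [he]
        · have hle : (rstripZ x).length ≤ x.length := rstripZ_length_le x
          have hcnt : l.length - (rstripZ x).length = (x.length - (rstripZ x).length) + 1 := by
            omega
          simp [he, hcnt, List.replicate_succ', List.append_assoc]
      · rw [if_neg hz]
        have hstrip : rstripZ l = l := by
          conv_lhs => rw [hsnoc]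
          rw [rstripZ_snoc_ne x L hz, ← hsnoc]
        unfold bForm
        rw [hstrip, if_neg hnil, hget]
        simp

-- characterisation of A's while loop: it scans the prefix take m l from its right end
theorem solveScan_eq (l : List Char) : ∀ (m : Nat), m ≤ l.length →
    solveScan l ((m : Int) - 1) =
      (m : Int) - 1 - ((l.take m).reverse.takeWhile (· == 'z')).length := by
  intro m
  induction m with
  | zero => intro _; rw [solveScan]; simp
  | succ m ih =>
    intro hm
    have hmlt : m < l.length := by omega
    have h1 : ((m + 1 : Nat) : Int) - 1 = (m : Int) := by push_cast; ring
    rw [h1, solveScan]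
    have hget : PySem.List.pyGet? l (m : Int) = some l[m] :=
      PySem.List.pyGet?_ofNat l m hmlt
    have htake : (l.take (m + 1)).reverse = l[m] :: (l.take m).reverse := by
      rw [List.take_add_one]; simp [hmlt]
    by_cases hz : l[m] = 'z'
    · have : (0 : Int) ≤ (m : Int) ∧ PySem.List.pyGet? l (m : Int) = some 'z' := by
        refine ⟨Int.natCast_nonneg m, by rw [hget, hz]⟩
      rw [dif_pos this, ih (by omega)]
      rw [htake, List.takeWhile_cons]
      simp only [hz, beq_self_eq_true, if_true, List.length_cons]
      push_cast; ring
    · have hcond : ¬ ((0 : Int) ≤ (m : Int) ∧ PySem.List.pyGet? l (m : Int) = some 'z') := by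
        rintro ⟨-, hc⟩
        rw [hget] at hc
        exact hz (Option.some.injEq _ _ ▸ hc)
      have hbeq : (l[m] == 'z') = false := beq_eq_false_iff_ne.mpr hz
      rw [dif_neg hcond, htake, List.takeWhile_cons, hbeq]
      simp only [Bool.false_eq_true, if_false, List.length_nil, Nat.cast_zero]
      ring

-- the fill loop 'for j in range(a, n): s_list[j] = "a"' overwrites the suffix
theorem fill_eq (d : Nat) : ∀ (a : Nat) (l : List Char), l.length - a = d → a ≤ l.length →
    (PySem.List.pyRange (a : Int) (l.length : Int) 1).foldl
      (fun acc j => PySem.List.pySetD acc j 'a') l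
      = l.take a ++ List.replicate (l.length - a) 'a' := by
  induction d with
  | zero =>
    intro a l h1 h2
    have : a = l.length := by omega
    subst this
    rw [PySem.List.pyRange_one_eq_nil (le_refl _)]
    simp
  | succ d ih =>
    intro a l h1 h2
    have halt : (a : Int) < (l.length : Int) := by omega
    rw [PySem.List.pyRange_one_cons halt]
    simp only [List.foldl_cons]
    have hset : PySem.List.pySetD l (a : Int) 'a' = l.set a 'a' :=
      PySem.List.pySetD_natCast (n := a) (xs := l) (v := 'a')
    have hlen : (l.set a 'a').length = l.length := by simp
    have hcast : ((a : Int) + 1) = ((a + 1 : Nat) : Int) := by push_cast; ring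
    rw [hset, hcast]
    have := ih (a + 1) (l.set a 'a') (by omega) (by omega)
    rw [hlen] at this
    rw [this]
    have hsetc : l.set a 'a' = l.take a ++ 'a' :: l.drop (a + 1) := by
      rw [List.set_eq_take_append_cons_drop, if_pos (by omega)]
    have hlta : (l.take a).length = a := by simp; omega
    have htk : (l.set a 'a').take (a + 1) = l.take a ++ ['a'] := by
      rw [hsetc, List.take_append, hlta, List.take_take]
      simp
    rw [htk, show l.length - a = (l.length - (a + 1)) + 1 by omega, List.replicate_succ]
    simp

theorem solve_eq_alt (s : String) : solve s = solve_alt s := by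
  unfold solve solve_alt
  rw [bumpAlt_eq_bForm s.toList.length s.toList rfl]
  unfold bForm
  simp only []
  generalize s.toList = l
  have htle : (l.reverse.takeWhile (· == 'z')).length ≤ l.length := by
    calc (l.reverse.takeWhile (· == 'z')).length ≤ l.reverse.length :=
          List.Sublist.length_le (List.takeWhile_sublist _)
      _ = l.length := List.length_reverse
  set n := l.length with hn
  set t := (l.reverse.takeWhile (· == 'z')).length with ht
  have hscan : solveScan l ((n : Int) - 1) = (n : Int) - 1 - t := by
    have := solveScan_eq l n (le_refl _)
    rwa [List.take_length] at this
  have hstr : rstripZ l = l.take (n - t) := rstripZ_eq_take l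
  simp only [hscan, hstr]
  by_cases hz : t = n
  · -- all-'z' (or empty) string: both return "-1"
    rw [if_pos (by omega), if_pos (by simp [hz])]
  · -- t < n : some character is bumped
    have htlt : t < n := lt_of_le_of_ne htle hz
    set k := n - t with hk
    have hk1 : 1 ≤ k := by omega
    have hkn : k ≤ n := by omega
    have hik : (n : Int) - 1 - t = (k : Int) - 1 := by omega
    rw [hik, if_neg (by omega)]
    have hkm1 : k - 1 < n := by omega
    have hcast : ((k : Int) - 1) = ((k - 1 : Nat) : Int) := by omega
    -- the stripped prefix, split at its last character
    have hsplit : l.take k = l.take (k - 1) ++ [l[k - 1]] := by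
      conv_lhs => rw [show k = (k - 1) + 1 by omega]
      rw [List.take_add_one]
      simp [List.getElem?_eq_getElem hkm1]
    rw [if_neg (by
      rw [hsplit]
      intro h0
      exact absurd (List.append_eq_nil_iff.mp h0).2 (List.cons_ne_nil _ _))]
    -- A side
    have hc : PySem.List.pyGetD l ((k : Int) - 1) 'a' = l[k - 1] := by
      rw [hcast, PySem.List.pyGetD_natCast]
      simp [List.getD_eq_getElem?_getD, List.getElem?_eq_getElem hkm1]
    set c' := Char.ofNat (l[k - 1].toNat + 1) with hc'
    have hset : PySem.List.pySetD l ((k : Int) - 1) c' = l.set (k - 1) c' := by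
      rw [hcast, PySem.List.pySetD_natCast]
    have hlen2 : (l.set (k - 1) c').length = n := by simp [hn]
    have hfill : (PySem.List.pyRange ((k : Int) - 1 + 1) (n : Int) 1).foldl
        (fun acc j => PySem.List.pySetD acc j 'a') (l.set (k - 1) c')
        = (l.set (k - 1) c').take k ++ List.replicate (n - k) 'a' := by
      have h0 : ((k : Int) - 1 + 1) = ((k : Nat) : Int) := by ring
      have h2 := fill_eq ((l.set (k - 1) c').length - k) k (l.set (k - 1) c') rfl (by omega)
      rw [hlen2] at h2
      rw [h0, h2]
    have htk : (l.set (k - 1) c').take k = l.take (k - 1) ++ [c'] := by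
      rw [List.take_set, hsplit, List.set_append_right _ _ (by simp [List.length_take]; try omega)]
      have h3 : k - 1 - (l.take (k - 1)).length = 0 := by simp [List.length_take]; omega
      rw [h3]
      simp
    -- B side: stripped = take (k-1) l ++ [l[k-1]]
    have hdl : (l.take k).dropLast = l.take (k - 1) := by
      rw [hsplit, List.dropLast_concat]
    have hlast : PySem.List.pyGetD (l.take k) (-1) 'a' = l[k - 1] := by
      rw [hsplit]
      exact PySem.List.pyGetD_neg_one_append_singleton _ _ _
    have hlenk : (l.take k).length = k := by simp [List.length_take]; omega
    rw [hc, hset, hfill, htk, hdl, hlast, hlenk]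

-- ===== VERDICT (by name: the statement is the Claim_ definition above) =====
theorem solve_spec : Claim_equal_solve := by
  intro s _
  unfold Spec_solve
  exact solve_eq_alt s
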